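-- pv_equiv track=rewrite | github.com/worstprogrammerCN/grade-2-summer-vacation-class | project/submission.py | get_vows_cons_pri_stress_train
-- ===== SOURCE A (Python) =====
-- def is_vowel(phoneme):
--     return phoneme[-1].isdigit()
--
-- def is_consonant(phoneme):
--     return not phoneme[-1].isdigit()
--
-- def is_pri_stress(phoneme):
--     return phoneme[-1] == '1'
--
-- def get_vows_cons_pri_stress_train(phonemes):
--     vowels = []
--     consonants = []
--     primary_stress = ""
--     for phoneme in phonemes:
--         if is_vowel(phoneme):
--             vowels.append(phoneme)
--         elif is_consonant(phoneme):
--             consonants.append(phoneme)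
--         if is_pri_stress(phoneme):
--             primary_stress = phoneme
--     return vowels, consonants, primary_stress
-- ===== SOURCE B (Python) =====
-- def get_vows_cons_pri_stress_train(phonemes):
--     vowels = [p for p in phonemes if p[-1].isdigit()]
--     consonants = [p for p in phonemes if not p[-1].isdigit()]
--     primary_stress = next((p for p in reversed(phonemes) if p[-1] == '1'), "")
--     return vowels, consonants, primary_stress
-- ===== Notes on version B (the rewrite author's own statement) =====
-- stated objective: idiomatic
-- what changed: Replaces the single interleaved accumulator loop by three independent derivations: two comprehensions filtering on the last character, and a reversed early-stopping search for the last primary-stress phoneme instead of overwriting a variable on every match.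
import Mathlib
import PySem

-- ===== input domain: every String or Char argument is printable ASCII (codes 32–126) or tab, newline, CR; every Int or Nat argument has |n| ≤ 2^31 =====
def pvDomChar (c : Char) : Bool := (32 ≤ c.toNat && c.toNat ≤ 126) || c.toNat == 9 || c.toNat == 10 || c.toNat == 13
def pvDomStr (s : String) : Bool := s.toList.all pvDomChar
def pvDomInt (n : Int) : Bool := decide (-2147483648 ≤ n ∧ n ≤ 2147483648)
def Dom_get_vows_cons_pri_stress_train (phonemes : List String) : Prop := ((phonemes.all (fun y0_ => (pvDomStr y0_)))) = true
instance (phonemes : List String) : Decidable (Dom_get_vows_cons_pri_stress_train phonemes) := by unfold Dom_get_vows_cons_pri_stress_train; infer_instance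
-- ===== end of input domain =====

-- B replaces A's single interleaved accumulator loop by three independent scans
-- (two filters on the last character, and a reversed early-stopping search for
-- the last primary-stress phoneme); objective: idiomatic, same O(n) cost.

-- ===== PORT A =====
-- phoneme[-1].isdigit()  (none = IndexError on ""; Pre_ excludes that input)
def pv_is_vowel (phoneme : String) : Bool :=
  match PySem.Str.pyGet? phoneme (-1) with
  | some c => PySem.Chars.isdigit c
  | none => false

def pv_is_consonant (phoneme : String) : Bool := !(pv_is_vowel phoneme)

-- phoneme[-1] == '1'
def pv_is_pri_stress (phoneme : String) : Bool :=
  PySem.Str.pyGet? phoneme (-1) == some '1'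

def get_vows_cons_pri_stress_train (phonemes : List String) : List String × List String × String :=
  phonemes.foldl
    (fun st phoneme =>
      let vowels := st.1
      let consonants := st.2.1
      let primary_stress := st.2.2
      let vowels := if pv_is_vowel phoneme then vowels ++ [phoneme] else vowels
      let consonants :=
        if pv_is_vowel phoneme then consonants
        else if pv_is_consonant phoneme then consonants ++ [phoneme] else consonants
      let primary_stress := if pv_is_pri_stress phoneme then phoneme else primary_stress
      (vowels, consonants, primary_stress))
    ([], [], "")

-- ===== PORT B =====
def pvb_last_is_digit (p : String) : Bool :=
  match PySem.Str.pyGet? p (-1) with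
  | some c => PySem.Chars.isdigit c
  | none => false

def pvb_last_is_one (p : String) : Bool :=
  PySem.Str.pyGet? p (-1) == some '1'

def get_vows_cons_pri_stress_train_alt (phonemes : List String) : List String × List String × String :=
  let vowels := phonemes.filter (fun p => pvb_last_is_digit p)
  let consonants := phonemes.filter (fun p => !(pvb_last_is_digit p))
  let primary_stress := (phonemes.reverse.find? (fun p => pvb_last_is_one p)).getD ""
  (vowels, consonants, primary_stress)

-- ===== PRECONDITION & SPEC =====
-- Pre_ excludes inputs containing the empty string, on which the real Python A
-- (and B) raise IndexError at phoneme[-1].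
def Pre_get_vows_cons_pri_stress_train (phonemes : List String) : Prop :=
  ∀ p ∈ phonemes, p ≠ ""
instance (phonemes : List String) : Decidable (Pre_get_vows_cons_pri_stress_train phonemes) := by
  unfold Pre_get_vows_cons_pri_stress_train; infer_instance

def pvWitness_get_vows_cons_pri_stress_train : List String := ["K", "AE1", "T"]

def Spec_get_vows_cons_pri_stress_train (phonemes : List String) (out : List String × List String × String) : Prop := out = get_vows_cons_pri_stress_train_alt phonemes
instance (phonemes : List String) (out : List String × List String × String) : Decidable (Spec_get_vows_cons_pri_stress_train phonemes out) := by unfold Spec_get_vows_cons_pri_stress_train; infer_instance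

-- ===== CLAIM (what is proved, stated in full; the proofs are below) =====
def Claim_equal_get_vows_cons_pri_stress_train : Prop := ∀ (phonemes : List String), Dom_get_vows_cons_pri_stress_train phonemes → Pre_get_vows_cons_pri_stress_train phonemes → Spec_get_vows_cons_pri_stress_train phonemes (get_vows_cons_pri_stress_train phonemes)

-- ===== LEMMAS AND PROOFS =====

-- The loop invariant: A's fold from (vs, cs, pr) appends the vowel/consonant
-- filters and replaces pr by the last primary-stress match (found by B's
-- reversed search) when there is one.
theorem pv_fold_invariant (l : List String) (vs cs : List String) (pr : String) :
    l.foldl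
      (fun st phoneme =>
        let vowels := st.1
        let consonants := st.2.1
        let primary_stress := st.2.2
        let vowels := if pv_is_vowel phoneme then vowels ++ [phoneme] else vowels
        let consonants :=
          if pv_is_vowel phoneme then consonants
          else if pv_is_consonant phoneme then consonants ++ [phoneme] else consonants
        let primary_stress := if pv_is_pri_stress phoneme then phoneme else primary_stress
        (vowels, consonants, primary_stress))
      (vs, cs, pr)
    = (vs ++ l.filter (fun p => pvb_last_is_digit p),
       cs ++ l.filter (fun p => !(pvb_last_is_digit p)),
       (l.reverse.find? (fun p => pvb_last_is_one p)).getD pr) := by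
  induction l generalizing vs cs pr with
  | nil => simp
  | cons x xs ih =>
    simp only [List.foldl_cons, List.reverse_cons, List.filter_cons]
    rw [ih]
    have hvd : pv_is_vowel x = pvb_last_is_digit x := rfl
    have hps : pv_is_pri_stress x = pvb_last_is_one x := rfl
    simp only [Prod.mk.injEq]
    refine ⟨?_, ?_, ?_⟩
    · by_cases h : pvb_last_is_digit x = true <;> simp [hvd, h]
    · by_cases h : pvb_last_is_digit x = true <;>
        simp [hvd, pv_is_consonant, h]
    · rw [List.find?_append]
      cases hf : xs.reverse.find? (fun p => pvb_last_is_one p) with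
      | some y => simp
      | none =>
        by_cases h : pvb_last_is_one x = true <;> simp [hps, h]

-- ===== VERDICT (by name: the statement is the Claim_ definition above) =====
theorem get_vows_cons_pri_stress_train_spec : Claim_equal_get_vows_cons_pri_stress_train := by
  intro phonemes _ _
  unfold Spec_get_vows_cons_pri_stress_train
  unfold get_vows_cons_pri_stress_train get_vows_cons_pri_stress_train_alt
  rw [pv_fold_invariant]
  simp
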